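-- pv_equiv track=rewrite | github.com/sara-k03/competitive-programming | String/AntiPalindrome/antipalindrome.py | contains_palindrome
-- ===== SOURCE A (Python) =====
-- def is_palindrome(s):
--     return s == s[::-1]
--
-- def contains_palindrome(text):
--     filtered = ""
--     for i in text:
--         if ( i.isalpha() ):
--             filtered += i.lower()
--
--     n = len(filtered)
--
--     for i in range(n):
--         for j in range(i + 2, n + 1):
--             if is_palindrome(filtered[i:j]):
--                 return True
--     return False
-- ===== SOURCE B (Python) =====
-- def contains_palindrome(text):
--     # One pass: some palindromic substring of length >= 2 exists in the
--     # filtered lowercase letters iff two equal letters are adjacent or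
--     # two apart (the center of any palindrome), so keep only the last
--     # two filtered letters and compare.
--     prev1 = prev2 = None
--     for ch in text:
--         if ch.isalpha():
--             c = ch.lower()
--             if prev1 == c or prev2 == c:
--                 return True
--             prev2 = prev1
--             prev1 = c
--     return False
-- ===== Notes on version B (the rewrite author's own statement) =====
-- stated objective: faster
-- what changed: Replaces the O(n^3) scan over all substrings with a single pass that compares each filtered letter with the previous one and the one before it (any palindrome of length>=2 has an equal adjacent or two-apart pair at its center), without building the filtered string.
import Mathlib
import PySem

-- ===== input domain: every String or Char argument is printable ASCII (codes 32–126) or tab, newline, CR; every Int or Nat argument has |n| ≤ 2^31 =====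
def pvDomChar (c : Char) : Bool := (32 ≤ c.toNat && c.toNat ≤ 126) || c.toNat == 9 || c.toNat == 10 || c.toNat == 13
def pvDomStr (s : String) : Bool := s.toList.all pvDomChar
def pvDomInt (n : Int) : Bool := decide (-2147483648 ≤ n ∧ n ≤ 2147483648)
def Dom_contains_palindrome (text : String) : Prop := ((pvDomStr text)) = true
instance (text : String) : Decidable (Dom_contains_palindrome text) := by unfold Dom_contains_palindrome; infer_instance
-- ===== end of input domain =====

-- B replaces A's O(n^3) all-substrings scan with a single pass that compares each
-- filtered letter with the previous one and the one before it (objective: faster, asymptotic).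

-- ===== PORT A =====
def is_palindrome (s : List Char) : Bool :=
  s == ((PySem.List.slice? s none none (-1)).getD [])

def contains_palindrome (text : String) : Bool :=
  let filtered : List Char :=
    text.toList.foldl (fun acc c =>
      if PySem.Chars.isalpha c then acc ++ [PySem.Chars.lowerChar c] else acc) []
  let n : Int := (filtered.length : Int)
  (PySem.List.pyRange 0 n 1).any (fun i =>
    (PySem.List.pyRange (i + 2) (n + 1) 1).any (fun j =>
      is_palindrome (PySem.List.slice filtered (some i) (some j))))

-- ===== PORT B =====
def pvAltLoop : List Char → Option Char → Option Char → Bool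
  | [], _, _ => false
  | ch :: rest, p1, p2 =>
    if PySem.Chars.isalpha ch then
      let c := PySem.Chars.lowerChar ch
      if p1 == some c || p2 == some c then true
      else pvAltLoop rest (some c) p1
    else pvAltLoop rest p1 p2

def contains_palindrome_alt (text : String) : Bool :=
  pvAltLoop text.toList none none

-- ===== PRECONDITION & SPEC =====
def Spec_contains_palindrome (text : String) (out : Bool) : Prop := out = contains_palindrome_alt text
instance (text : String) (out : Bool) : Decidable (Spec_contains_palindrome text out) := by unfold Spec_contains_palindrome; infer_instance

-- ===== CLAIM (what is proved, stated in full; the proofs are below) =====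
def Claim_equal_contains_palindrome : Prop := ∀ (text : String), Dom_contains_palindrome text → Spec_contains_palindrome text (contains_palindrome text)

-- ===== LEMMAS AND PROOFS =====

-- "two equal letters adjacent or two apart at position i"
def pvPairAt (L : List Char) (i : Nat) : Prop :=
  ∃ c, L[i]? = some c ∧ (L[i+1]? = some c ∨ L[i+2]? = some c)

-- B's loop specialised to an already-filtered, lowered list
def pvG : List Char → Option Char → Option Char → Bool
  | [], _, _ => false
  | c :: t, p1, p2 => if p1 == some c || p2 == some c then true else pvG t (some c) p1

theorem pvAltLoop_eq_pvG (l : List Char) (p1 p2 : Option Char) :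
    pvAltLoop l p1 p2 = pvG ((l.filter PySem.Chars.isalpha).map PySem.Chars.lowerChar) p1 p2 := by
  induction l generalizing p1 p2 with
  | nil => rfl
  | cons ch rest ih =>
    by_cases h : PySem.Chars.isalpha ch = true
    · simp [pvAltLoop, pvG, h, ih]
    · simp [pvAltLoop, h, ih]

theorem pvPairAt_cons (c : Char) (t : List Char) :
    (∃ i, pvPairAt (c :: t) i) ↔ (t[0]? = some c ∨ t[1]? = some c) ∨ ∃ i, pvPairAt t i := by
  constructor
  · rintro ⟨i, d, hd, h⟩
    cases i with
    | zero =>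
      simp only [List.getElem?_cons_zero, Option.some.injEq] at hd
      subst hd
      left; simpa using h
    | succ n =>
      right
      exact ⟨n, d, by simpa using hd, by simpa using h⟩
  · rintro (h | ⟨i, d, hd, hh⟩)
    · exact ⟨0, c, by simp, by simpa using h⟩
    · exact ⟨i + 1, d, by simpa using hd, by simpa using hh⟩

theorem pvG_iff : ∀ (L : List Char) (p1 p2 : Option Char),
    pvG L p1 p2 = true ↔
      ((∃ c, L[0]? = some c ∧ (p1 = some c ∨ p2 = some c)) ∨
       (∃ c, L[1]? = some c ∧ p1 = some c) ∨ ∃ i, pvPairAt L i)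
  | [], p1, p2 => by simp [pvG, pvPairAt]
  | c :: t, p1, p2 => by
    by_cases hm : p1 = some c ∨ p2 = some c
    · have h1 : pvG (c :: t) p1 p2 = true := by
        rcases hm with h | h <;> simp [pvG, h]
      simp only [h1, true_iff]
      exact Or.inl ⟨c, by simp, hm⟩
    · rw [not_or] at hm
      have hg : pvG (c :: t) p1 p2 = pvG t (some c) p1 := by
        simp [pvG, hm.1, hm.2]
      rw [hg, pvG_iff t (some c) p1, pvPairAt_cons]
      simp only [List.getElem?_cons_zero, List.getElem?_cons_succ, Option.some.injEq]
      constructor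
      · rintro (⟨d, hd, h | h⟩ | ⟨d, hd, h⟩ | h)
        · subst h; exact Or.inr (Or.inr (Or.inl (Or.inl hd)))
        · exact Or.inr (Or.inl ⟨d, hd, h⟩)
        · subst h; exact Or.inr (Or.inr (Or.inl (Or.inr hd)))
        · exact Or.inr (Or.inr (Or.inr h))
      · rintro (⟨d, hd, h⟩ | ⟨d, hd, h⟩ | (h | h) | h)
        · subst hd; rcases h with h | h
          · exact absurd h hm.1
          · exact absurd h hm.2
        · exact Or.inl ⟨d, hd, Or.inr h⟩
        · exact Or.inl ⟨c, h, Or.inl rfl⟩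
        · exact Or.inr (Or.inl ⟨c, h, rfl⟩)
        · exact Or.inr (Or.inr h)

theorem is_palindrome_iff (S : List Char) : is_palindrome S = true ↔ S = S.reverse := by
  simp [is_palindrome, PySem.List.slice?_none_none_neg_one]

theorem pvSlice_getElem (L : List Char) (a b k : Nat) (hk : k < b - a) :
    (PySem.List.slice L (some (a : Int)) (some (b : Int)))[k]? = L[a + k]? := by
  rw [PySem.List.slice_natCast, List.getElem?_take_of_lt hk, List.getElem?_drop]

theorem pvSlice_length (L : List Char) (a b : Nat) (hb : b ≤ L.length) :
    (PySem.List.slice L (some (a : Int)) (some (b : Int))).length = b - a := by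
  rw [PySem.List.slice_natCast]
  simp only [List.length_take, List.length_drop]
  omega

theorem pvA_iff (L : List Char) :
    ((PySem.List.pyRange 0 (L.length : Int) 1).any (fun i =>
      (PySem.List.pyRange (i + 2) ((L.length : Int) + 1) 1).any (fun j =>
        is_palindrome (PySem.List.slice L (some i) (some j))))) = true ↔
      ∃ i, pvPairAt L i := by
  rw [List.any_eq_true]
  constructor
  · rintro ⟨i, hi, hin⟩
    rw [List.any_eq_true] at hin
    obtain ⟨j, hj, hpal⟩ := hin
    rw [PySem.List.mem_pyRange_one] at hi hj
    obtain ⟨a, rfl⟩ : ∃ a : Nat, i = (a : Int) := ⟨i.toNat, (Int.toNat_of_nonneg hi.1).symm⟩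
    obtain ⟨b, rfl⟩ : ∃ b : Nat, j = (b : Int) := ⟨j.toNat, (Int.toNat_of_nonneg (by omega)).symm⟩
    have hab : a + 2 ≤ b := by exact_mod_cast hj.1
    have hbL : b ≤ L.length := by
      have := hj.2; omega
    set S := PySem.List.slice L (some (a : Int)) (some (b : Int)) with hS
    have hpal' : S = S.reverse := (is_palindrome_iff S).mp hpal
    have hlen : S.length = b - a := pvSlice_length L a b hbL
    set m := b - a with hmdef
    have hm2 : 2 ≤ m := by omega
    set k0 := (m - 2) / 2 with hk0def
    have hk0m : k0 < m := by omega
    have hk1m : m - 1 - k0 < m := by omega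
    have e1 : S[k0]? = S[m - 1 - k0]? := by
      conv_lhs => rw [hpal']
      rw [List.getElem?_reverse (hlen ▸ hk0m), hlen]
    obtain ⟨c, hck0⟩ : ∃ c, S[k0]? = some c :=
      ⟨S[k0]'(hlen ▸ hk0m), List.getElem?_eq_getElem _⟩
    have hLk0 : L[a + k0]? = some c := by
      rw [← pvSlice_getElem L a b k0 (by omega)]; exact hck0
    have hLk1 : L[a + (m - 1 - k0)]? = some c := by
      rw [← pvSlice_getElem L a b _ (by omega), ← e1]; exact hck0
    refine ⟨a + k0, c, hLk0, ?_⟩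
    rcases Nat.even_or_odd m with ⟨t, ht⟩ | ⟨t, ht⟩
    · left
      rw [show a + k0 + 1 = a + (m - 1 - k0) by omega]
      exact hLk1
    · right
      rw [show a + k0 + 2 = a + (m - 1 - k0) by omega]
      exact hLk1
  · rintro ⟨k, c, hk, hnext⟩
    obtain ⟨hkL, hkv⟩ := List.getElem?_eq_some_iff.mp hk
    rcases hnext with h1 | h2
    · obtain ⟨hk1L, hk1v⟩ := List.getElem?_eq_some_iff.mp h1
      refine ⟨(k : Int), by rw [PySem.List.mem_pyRange_one]; constructor <;> [omega; exact_mod_cast hkL], ?_⟩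
      rw [List.any_eq_true]
      refine ⟨(k : Int) + 2, by rw [PySem.List.mem_pyRange_one]; constructor <;> [omega; (push_cast; omega)], ?_⟩
      have hsl : PySem.List.slice L (some (k : Int)) (some ((k : Int) + 2)) = [c, c] := by
        rw [show ((k : Int) + 2) = ((k + 2 : Nat) : Int) by push_cast; ring, PySem.List.slice_natCast]
        rw [List.drop_eq_getElem_cons hkL, List.drop_eq_getElem_cons hk1L, hkv, hk1v]
        simp
      rw [hsl]
      simp [is_palindrome, PySem.List.slice?_none_none_neg_one]
    · obtain ⟨hk2L, hk2v⟩ := List.getElem?_eq_some_iff.mp h2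
      have hk1L : k + 1 < L.length := by omega
      refine ⟨(k : Int), by rw [PySem.List.mem_pyRange_one]; constructor <;> [omega; exact_mod_cast hkL], ?_⟩
      rw [List.any_eq_true]
      refine ⟨(k : Int) + 3, by rw [PySem.List.mem_pyRange_one]; constructor <;> [omega; (push_cast; omega)], ?_⟩
      have hsl : PySem.List.slice L (some (k : Int)) (some ((k : Int) + 3)) = [c, L[k+1], c] := by
        rw [show ((k : Int) + 3) = ((k + 3 : Nat) : Int) by push_cast; ring, PySem.List.slice_natCast]
        rw [List.drop_eq_getElem_cons hkL, List.drop_eq_getElem_cons hk1L,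
            List.drop_eq_getElem_cons hk2L, hkv, hk2v]
        simp
      rw [hsl]
      simp [is_palindrome, PySem.List.slice?_none_none_neg_one]

-- ===== VERDICT (by name: the statement is the Claim_ definition above) =====
theorem contains_palindrome_spec : Claim_equal_contains_palindrome := by
  intro text _
  unfold Spec_contains_palindrome contains_palindrome contains_palindrome_alt
  rw [PySem.List.foldl_append_if, pvAltLoop_eq_pvG]
  simp only [List.nil_append]
  rw [Bool.eq_iff_iff, pvA_iff, pvG_iff]
  simp
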